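-- pv_equiv track=rewrite | github.com/dudamarlena/pyc_source | pycfiles/pylinkmobile-0.3.0.tar/p10.cpython-36.py | access_sort
-- ===== SOURCE A (Python) =====
-- def access_sort(key):
--     """
--     Sorts (prefixmode, UID) keys based on the prefix modes given.
--     """
--     prefixes, user = key
--     accesses = {'o':100,
--      'h':10,  'v':1}
--     num = 0
--     for prefix in prefixes:
--         num += accesses.get(prefix, 0)
--
--     return num
-- ===== SOURCE B (Python) =====
-- def access_sort(key):
--     """
--     Sorts (prefixmode, UID) keys based on the prefix modes given.
--
--     B: build a frequency table of the prefix characters first, then total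
--     weight*count per distinct character (different decomposition, same value).
--     """
--     prefixes, user = key
--     accesses = {'o': 100, 'h': 10, 'v': 1}
--     counts = {}
--     for c in prefixes:
--         counts[c] = counts.get(c, 0) + 1
--     return sum(accesses.get(c, 0) * n for c, n in counts.items())
-- ===== Notes on version B (the rewrite author's own statement) =====
-- stated objective: alternative
-- what changed: B replaces A's per-character weight accumulation with two passes: it first builds a frequency table of the prefix characters, then sums weight*count over each distinct character in the table.
import Mathlib
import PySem

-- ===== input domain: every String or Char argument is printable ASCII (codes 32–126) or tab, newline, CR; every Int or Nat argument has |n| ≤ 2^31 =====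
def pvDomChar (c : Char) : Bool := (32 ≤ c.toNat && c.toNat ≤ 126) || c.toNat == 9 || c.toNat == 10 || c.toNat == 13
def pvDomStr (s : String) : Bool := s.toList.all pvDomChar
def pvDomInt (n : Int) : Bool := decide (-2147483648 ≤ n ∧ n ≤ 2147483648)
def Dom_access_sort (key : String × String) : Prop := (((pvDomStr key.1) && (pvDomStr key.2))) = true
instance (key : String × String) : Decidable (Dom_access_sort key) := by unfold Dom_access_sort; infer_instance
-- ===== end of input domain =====

-- A = per-character weight accumulation; B = frequency table first, then weight*count per
-- distinct character (alternative decomposition, same value; proved equal on all inputs).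


-- ===== PORT A =====
-- accesses = {'o':100, 'h':10, 'v':1} (both Pythons define this same literal dict)
def pvAccesses : PySem.Dict Char Int := PySem.Dict.ofList [('o', 100), ('h', 10), ('v', 1)]

def access_sort (key : String × String) : Int :=
  -- prefixes, user = key; num = 0; for prefix in prefixes: num += accesses.get(prefix, 0)
  key.1.toList.foldl (fun num pfx => num + pvAccesses.getD pfx 0) 0

-- ===== PORT B =====
def access_sort_alt (key : String × String) : Int :=
  -- counts = {}; for c in prefixes: counts[c] = counts.get(c, 0) + 1
  let counts : PySem.Dict Char Int :=
    key.1.toList.foldl (fun d c => d.insert c (d.getD c 0 + 1)) PySem.Dict.empty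
  -- sum(accesses.get(c, 0) * n for c, n in counts.items())
  counts.items.foldl (fun total p => total + pvAccesses.getD p.1 0 * p.2) 0

-- ===== PRECONDITION & SPEC =====
def Spec_access_sort (key : String × String) (out : Int) : Prop := out = access_sort_alt key
instance (key : String × String) (out : Int) : Decidable (Spec_access_sort key out) := by unfold Spec_access_sort; infer_instance

-- ===== CLAIM (what is proved, stated in full; the proofs are below) =====
def Claim_equal_access_sort : Prop := ∀ (key : String × String), Dom_access_sort key → Spec_access_sort key (access_sort key)

-- ===== LEMMAS AND PROOFS =====

-- sum of weights over all characters = sum of weight*count over distinct characters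
theorem pv_count_sum (w : Char → Int) (xs : List Char) :
    ((PySem.Set.ofList xs).map (fun k => w k * (xs.count k : Int))).sum = (xs.map w).sum := by
  have hnd : (PySem.Set.ofList xs).Nodup := PySem.Set.nodup_ofList xs
  have hfin : (PySem.Set.ofList xs).toFinset = xs.toFinset := by
    apply Finset.ext
    intro a
    simp [PySem.Set.mem_ofList]
  calc ((PySem.Set.ofList xs).map (fun k => w k * (xs.count k : Int))).sum
      = ∑ a ∈ (PySem.Set.ofList xs).toFinset, w a * (xs.count a : Int) :=
        (List.sum_toFinset _ hnd).symm
    _ = ∑ a ∈ xs.toFinset, xs.count a • w a := by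
        rw [hfin]
        refine Finset.sum_congr rfl (fun a _ => ?_)
        simp [mul_comm]
    _ = (xs.map w).sum := (Finset.sum_list_map_count xs w).symm

-- ===== VERDICT (by name: the statement is the Claim_ definition above) =====
theorem access_sort_spec : Claim_equal_access_sort := by
  intro key _
  unfold Spec_access_sort access_sort access_sort_alt
  rw [PySem.Dict.foldl_insert_getD_add_one_eq_counter]
  show List.foldl (fun num pfx => num + pvAccesses.getD pfx 0) 0 key.1.toList =
    List.foldl (fun total p => total + pvAccesses.getD p.1 0 * p.2) 0
      (PySem.Dict.counter key.1.toList).items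
  rw [PySem.Dict.items_counter]
  rw [PySem.List.foldl_add, PySem.List.foldl_add]
  simp only [zero_add, List.map_map]
  exact (pv_count_sum _ key.1.toList).symm
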